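-- pv_equiv track=rewrite | github.com/n3rwus/flask-panoptic-segmentation | application/utils/image_segmentation_transform_pipeline.py | conversion_table_for_Detectron2
-- ===== SOURCE A (Python) =====
-- def conversion_table_for_Detectron2(CLASSES):
--     coco2d2 = {}
--     count = 0
--     for i, c in enumerate(CLASSES):
--         if c != "N/A":
--             coco2d2[i] = count
--             count += 1
--     return coco2d2
-- ===== SOURCE B (Python) =====
-- def conversion_table_for_Detectron2(CLASSES):
--     # stateless closed form: each kept index maps to the number of
--     # non-"N/A" classes strictly before it (no running counter)
--     return {i: sum(1 for x in CLASSES[:i] if x != "N/A")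
--             for i, c in enumerate(CLASSES) if c != "N/A"}
-- ===== Notes on version B (the rewrite author's own statement) =====
-- stated objective: alternative
-- what changed: Replaces A's single accumulating pass with a running counter by a stateless per-key closed form: each kept index is mapped to the count of non-'N/A' entries in its own prefix CLASSES[:i], trading O(n) for O(n^2) but eliminating all loop state.
import Mathlib
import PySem

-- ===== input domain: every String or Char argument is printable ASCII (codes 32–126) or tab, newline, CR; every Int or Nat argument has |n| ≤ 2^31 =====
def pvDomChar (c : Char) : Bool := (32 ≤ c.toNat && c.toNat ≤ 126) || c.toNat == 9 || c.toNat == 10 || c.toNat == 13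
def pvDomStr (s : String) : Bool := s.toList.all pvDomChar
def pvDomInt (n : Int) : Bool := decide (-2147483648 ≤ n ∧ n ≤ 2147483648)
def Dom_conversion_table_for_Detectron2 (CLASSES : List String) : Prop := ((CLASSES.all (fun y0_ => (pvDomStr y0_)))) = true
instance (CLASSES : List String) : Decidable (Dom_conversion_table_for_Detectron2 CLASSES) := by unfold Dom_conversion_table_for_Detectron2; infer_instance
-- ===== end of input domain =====

-- B replaces A's accumulating pass (running count) by a stateless closed form mapping each
-- kept index i to the number of non-"N/A" classes in CLASSES[:i] (objective: alternative, not faster).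


-- ===== PORT A =====
-- the loop body: if c != "N/A": coco2d2[i] = count; count += 1
def pvStepA (st : PySem.Dict Int Int × Int) (ic : Int × String) : PySem.Dict Int Int × Int :=
  if ic.2 ≠ "N/A" then (st.1.insert ic.1 st.2, st.2 + 1) else st

def conversion_table_for_Detectron2 (CLASSES : List String) : List (Int × Int) :=
  ((PySem.List.enumerate CLASSES 0).foldl pvStepA (PySem.Dict.empty, 0)).1.items

-- ===== PORT B =====
-- sum(1 for x in CLASSES[:i] if x != "N/A")
def pvPrefCount (CLASSES : List String) (i : Int) : Int :=
  (((PySem.List.slice CLASSES none (some i)).filter (fun x => x ≠ "N/A")).length : Int)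

def conversion_table_for_Detectron2_alt (CLASSES : List String) : List (Int × Int) :=
  (PySem.List.enumerate CLASSES 0).filterMap
    (fun p => if p.2 ≠ "N/A" then some (p.1, pvPrefCount CLASSES p.1) else none)

-- ===== PRECONDITION & SPEC =====
def Spec_conversion_table_for_Detectron2 (CLASSES : List String) (out : List (Int × Int)) : Prop := out = conversion_table_for_Detectron2_alt CLASSES
instance (CLASSES : List String) (out : List (Int × Int)) : Decidable (Spec_conversion_table_for_Detectron2 CLASSES out) := by unfold Spec_conversion_table_for_Detectron2; infer_instance

-- ===== CLAIM (what is proved, stated in full; the proofs are below) =====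
def Claim_equal_conversion_table_for_Detectron2 : Prop := ∀ (CLASSES : List String), Dom_conversion_table_for_Detectron2 CLASSES → Spec_conversion_table_for_Detectron2 CLASSES (conversion_table_for_Detectron2 CLASSES)

-- ===== LEMMAS AND PROOFS =====

-- count of kept entries (as Int) of a list
def pvCnt (l : List String) : Int := ((l.filter (fun x => x ≠ "N/A")).length : Int)

-- loop invariant: A's fold from (d, c), with every key of d below the enumeration start s,
-- appends exactly the prefix-count table of the remaining suffix, offset by c.
lemma pvLoopA_eq (l : List String) (s : Int) (d : PySem.Dict Int Int) (c : Int)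
    (h : ∀ k ∈ d.keys, k < s) :
    ((PySem.List.enumerate l s).foldl pvStepA (d, c)).1.items
      = d.items ++ (PySem.List.enumerate l s).filterMap
          (fun p => if p.2 ≠ "N/A" then some (p.1, c + pvCnt (l.take (p.1 - s).toNat)) else none) := by
  induction l generalizing s d c with
  | nil => simp [PySem.List.enumerate_nil]
  | cons x xs ih =>
    rw [PySem.List.enumerate_cons]
    by_cases hx : x ≠ "N/A"
    · have hstep : pvStepA (d, c) (s, x) = (d.insert s c, c + 1) := by
        simp [pvStepA, hx]
      have hnc : d.contains s = false := by
        by_contra hcon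
        have : s ∈ d.keys := (PySem.Dict.contains_iff_mem_keys d s).mp
          (by revert hcon; cases d.contains s <;> simp)
        exact absurd (h s this) (lt_irrefl s)
      have hitems := PySem.Dict.items_insert_of_not_contains (d := d) (k := s) (v := c) hnc
      have h' : ∀ k ∈ (d.insert s c).keys, k < s + 1 := by
        intro k hk
        rcases (PySem.Dict.mem_keys_insert (d := d) (k := s) (v := c) (k' := k)).mp hk with rfl | hk'
        · omega
        · have := h k hk'; omega
      rw [List.foldl_cons, hstep, ih (s + 1) (d.insert s c) (c + 1) h', hitems]
      rw [List.filterMap_cons]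
      simp only [hx, if_pos, ne_eq, not_false_eq_true]
      have htail : (PySem.List.enumerate xs (s + 1)).filterMap
          (fun p => if p.2 ≠ "N/A" then some (p.1, (c + 1) + pvCnt (xs.take (p.1 - (s + 1)).toNat)) else none)
        = (PySem.List.enumerate xs (s + 1)).filterMap
          (fun p => if p.2 ≠ "N/A" then some (p.1, c + pvCnt ((x :: xs).take (p.1 - s).toNat)) else none) := by
        apply List.filterMap_congr
        intro p hp
        rcases (PySem.List.mem_enumerate_iff _ _ p).mp hp with ⟨k, hk, rfl⟩
        have h1 : ((s + 1 + (k : Int), xs[k]).1 - (s + 1)).toNat = k := by simp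
        have h2 : ((s + 1 + (k : Int), xs[k]).1 - s).toNat = k + 1 := by
          simp; omega
        rw [h1, h2]
        by_cases hv : xs[k] ≠ "N/A"
        · simp only [hv, ite_true, ne_eq, not_false_eq_true]
          have : pvCnt ((x :: xs).take (k + 1)) = 1 + pvCnt (xs.take k) := by
            simp [pvCnt, hx]; omega
          rw [this]; ring_nf
        · simp [hv]
      rw [htail]
      have : ((s, x).1 - s).toNat = 0 := by simp
      rw [this]
      simp [pvCnt, List.append_assoc]
    · have hstep : pvStepA (d, c) (s, x) = (d, c) := by
        simp [pvStepA, hx]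
      rw [List.foldl_cons, hstep, ih (s + 1) d c (fun k hk => by have := h k hk; omega)]
      rw [List.filterMap_cons]
      simp only [hx]
      have htail : (PySem.List.enumerate xs (s + 1)).filterMap
          (fun p => if p.2 ≠ "N/A" then some (p.1, c + pvCnt (xs.take (p.1 - (s + 1)).toNat)) else none)
        = (PySem.List.enumerate xs (s + 1)).filterMap
          (fun p => if p.2 ≠ "N/A" then some (p.1, c + pvCnt ((x :: xs).take (p.1 - s).toNat)) else none) := by
        apply List.filterMap_congr
        intro p hp
        rcases (PySem.List.mem_enumerate_iff _ _ p).mp hp with ⟨k, hk, rfl⟩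
        have h1 : ((s + 1 + (k : Int), xs[k]).1 - (s + 1)).toNat = k := by simp
        have h2 : ((s + 1 + (k : Int), xs[k]).1 - s).toNat = k + 1 := by simp; omega
        rw [h1, h2]
        have hxe : ¬ (x ≠ "N/A") := hx
        have : pvCnt ((x :: xs).take (k + 1)) = pvCnt (xs.take k) := by
          simp [pvCnt, not_not.mp hxe]
        rw [this]
      rw [htail]
      simp

-- B's pvPrefCount at a nonnegative enumeration index is the prefix count via take
lemma pvPrefCount_eq (CLASSES : List String) (i : Int) (hi : 0 ≤ i) :
    pvPrefCount CLASSES i = pvCnt (CLASSES.take i.toNat) := by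
  simp [pvPrefCount, pvCnt, PySem.List.slice_to CLASSES hi]

-- ===== VERDICT (by name: the statement is the Claim_ definition above) =====
theorem conversion_table_for_Detectron2_spec : Claim_equal_conversion_table_for_Detectron2 := by
  intro CLASSES _
  unfold Spec_conversion_table_for_Detectron2 conversion_table_for_Detectron2
    conversion_table_for_Detectron2_alt
  rw [pvLoopA_eq CLASSES 0 PySem.Dict.empty 0 (by simp)]
  have : (PySem.Dict.empty : PySem.Dict Int Int).items = [] := by simp [PySem.Dict.empty]
  rw [this, List.nil_append]
  apply List.filterMap_congr
  intro p hp
  rcases (PySem.List.mem_enumerate_iff _ _ p).mp hp with ⟨k, hk, rfl⟩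
  by_cases hv : CLASSES[k] ≠ "N/A"
  · simp only [hv, ite_true, ne_eq, not_false_eq_true]
    rw [pvPrefCount_eq _ _ (by simp)]
    simp
  · simp [hv]
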